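-- pv_equiv track=rewrite | github.com/Nextein/MarcYourMind | scripts/cycles.py | split_into_sets
-- ===== SOURCE A (Python) =====
-- def split_into_sets(data, states, value):
--     sets = []
--     current_set_indices = []
--     for i, state in enumerate(states):
--         if state == value:
--             current_set_indices.append(i)
--         else:
--             if current_set_indices:
--                 sets.append(current_set_indices)
--                 current_set_indices = []
--     # Append the last set if it exists
--     if current_set_indices:
--         sets.append(current_set_indices)
--     return sets
-- ===== SOURCE B (Python) =====
-- def split_into_sets(data, states, value):
--     n = len(states)
--     sets = []
--     i = 0
--     while i < n:
--         if states[i] == value: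
--             j = i
--             while j < n and states[j] == value:
--                 j += 1
--             sets.append(list(range(i, j)))
--             i = j
--         else:
--             i += 1
--     return sets
-- ===== Notes on version B (the rewrite author's own statement) =====
-- stated objective: alternative
-- what changed: Replaces A's element-by-element accumulator with end-of-run flush by a two-pointer run scan: find each maximal run of matching states and emit its index range directly.
import Mathlib
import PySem

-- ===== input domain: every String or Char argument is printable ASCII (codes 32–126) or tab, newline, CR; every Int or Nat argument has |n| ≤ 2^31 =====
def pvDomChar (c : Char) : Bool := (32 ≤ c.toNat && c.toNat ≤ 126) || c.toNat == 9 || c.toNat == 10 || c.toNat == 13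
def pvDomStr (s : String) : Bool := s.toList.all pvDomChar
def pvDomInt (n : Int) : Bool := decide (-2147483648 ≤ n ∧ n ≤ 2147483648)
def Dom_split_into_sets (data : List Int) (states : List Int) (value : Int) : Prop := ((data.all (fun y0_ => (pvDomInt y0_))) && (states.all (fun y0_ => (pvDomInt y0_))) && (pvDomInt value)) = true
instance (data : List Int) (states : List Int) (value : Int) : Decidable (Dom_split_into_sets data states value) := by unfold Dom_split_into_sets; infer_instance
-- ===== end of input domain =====

-- B replaces A's accumulator-with-flush loop by a two-pointer maximal-run scan (alternative decomposition, same cost).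


-- ===== PORT A =====
-- the 'for i, state in enumerate(states)' loop: structural recursion over states with the index counter i;
-- state = (sets, current_set_indices), appends kept as '++ [x]' as in Python's append
def aLoop (states : List Int) (value : Int) (i : Nat) (cur : List Int) (sets : List (List Int)) : List (List Int) :=
  match states with
  | [] => if cur ≠ [] then sets ++ [cur] else sets   -- the end-of-loop flush
  | s :: rest =>
    if s = value then aLoop rest value (i + 1) (cur ++ [(i : Int)]) sets
    else aLoop rest value (i + 1) [] (if cur ≠ [] then sets ++ [cur] else sets)

def split_into_sets (data : List Int) (states : List Int) (value : Int) : List (List Int) :=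
  aLoop states value 0 [] []

-- ===== PORT B =====
-- the inner 'while j < n and states[j] == value: j += 1' loop of Source B
def runEnd (states : List Int) (value : Int) (j : Nat) : Nat :=
  if h : j < states.length then
    if states[j] = value then runEnd states value (j + 1) else j
  else j
termination_by states.length - j

theorem runEnd_ge (states : List Int) (value : Int) (j : Nat) : j ≤ runEnd states value j := by
  unfold runEnd
  split
  · split
    · have := runEnd_ge states value (j + 1); omega
    · exact Nat.le_refl j
  · exact Nat.le_refl j
termination_by states.length - j

-- 'list(range(i, j))' of Source B, ported by hand (exact: i ≤ j naturals, ascending Int indices)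
def rng (a b : Nat) : List Int := (List.range' a (b - a)).map (fun k => (k : Int))

-- the outer 'while i < n' loop of Source B
def altLoop (states : List Int) (value : Int) (i : Nat) : List (List Int) :=
  if h : i < states.length then
    if hv : states[i] = value then
      rng i (runEnd states value i) :: altLoop states value (runEnd states value i)
    else altLoop states value (i + 1)
  else []
termination_by states.length - i
decreasing_by
  · have h1 : runEnd states value i = runEnd states value (i + 1) := by
      rw [runEnd]; simp [h, hv]
    have h2 := runEnd_ge states value (i + 1)
    omega
  · omega

def split_into_sets_alt (data : List Int) (states : List Int) (value : Int) : List (List Int) :=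
  altLoop states value 0

-- ===== PRECONDITION & SPEC =====
def Spec_split_into_sets (data : List Int) (states : List Int) (value : Int) (out : List (List Int)) : Prop := out = split_into_sets_alt data states value
instance (data : List Int) (states : List Int) (value : Int) (out : List (List Int)) : Decidable (Spec_split_into_sets data states value out) := by unfold Spec_split_into_sets; infer_instance

-- ===== CLAIM (what is proved, stated in full; the proofs are below) =====
def Claim_equal_split_into_sets : Prop := ∀ (data : List Int) (states : List Int) (value : Int), Dom_split_into_sets data states value → Spec_split_into_sets data states value (split_into_sets data states value)

-- ===== LEMMAS AND PROOFS =====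

theorem rng_self (a : Nat) : rng a a = [] := by simp [rng]

theorem rng_snoc (a b : Nat) (hab : a ≤ b) : rng a b ++ [(b : Int)] = rng a (b + 1) := by
  have h1 : b + 1 - a = (b - a) + 1 := by omega
  have h2 : a + (b - a) = b := by omega
  simp [rng, h1, List.range'_1_concat, h2]

theorem rng_ne_nil (a b : Nat) (hab : a < b) : rng a b ≠ [] := by
  intro h
  have := congrArg List.length h
  simp [rng] at this
  omega

theorem altLoop_pos (states : List Int) (value : Int) (i : Nat) (h : i < states.length)
    (hv : states[i] = value) :
    altLoop states value i =
      rng i (runEnd states value i) :: altLoop states value (runEnd states value i) := by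
  rw [altLoop]; simp [h, hv]

theorem altLoop_neg (states : List Int) (value : Int) (i : Nat) (h : i < states.length)
    (hv : ¬ states[i] = value) :
    altLoop states value i = altLoop states value (i + 1) := by
  rw [altLoop]; simp [h, hv]

theorem altLoop_end (states : List Int) (value : Int) (i : Nat) (h : ¬ i < states.length) :
    altLoop states value i = [] := by
  rw [altLoop]; simp [h]

theorem runEnd_eq (states : List Int) (value : Int) (i0 e : Nat) (h0 : i0 ≤ e)
    (he : e ≤ states.length)
    (hrun : ∀ k (hk : k < states.length), i0 ≤ k → k < e → states[k]'hk = value)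
    (hstop : e = states.length ∨ ∃ (h : e < states.length), states[e]'h ≠ value) :
    runEnd states value i0 = e := by
  rw [runEnd]
  rcases Nat.eq_or_lt_of_le h0 with heq | hlt
  · subst heq
    split
    · rcases hstop with h1 | ⟨h2, h3⟩
      · omega
      · simp [h3]
    · omega
  · have hi : i0 < states.length := by omega
    rw [dif_pos hi, if_pos (hrun i0 hi (Nat.le_refl _) hlt)]
    exact runEnd_eq states value (i0 + 1) e hlt he
      (fun k hk h1 h2 => hrun k hk (by omega) h2) hstop
termination_by e - i0

theorem main_lemma (states : List Int) (value : Int) :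
    ∀ (i i0 : Nat) (sets : List (List Int)), i0 ≤ i → i ≤ states.length →
    (∀ k (hk : k < states.length), i0 ≤ k → k < i → states[k]'hk = value) →
    aLoop (states.drop i) value i (rng i0 i) sets = sets ++ altLoop states value i0 := by
  intro i i0 sets h0 hle hrun
  by_cases hi : i < states.length
  · -- i < length: drop i = states[i] :: drop (i+1)
    rw [List.drop_eq_getElem_cons hi]
    by_cases hv : states[i] = value
    · -- continue the current run
      rw [aLoop, if_pos hv, rng_snoc i0 i h0]
      exact main_lemma states value (i + 1) i0 sets (by omega) (by omega)
        (fun k hk h1 h2 => by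
          rcases Nat.lt_or_ge k i with h3 | h3
          · exact hrun k hk h1 h3
          · have hki : k = i := by omega
            subst hki; exact hv)
    · -- the run (if any) is flushed here
      rw [aLoop, if_neg hv]
      have IH := main_lemma states value (i + 1) (i + 1)
        (if rng i0 i ≠ [] then sets ++ [rng i0 i] else sets)
        (Nat.le_refl _) (by omega) (fun k hk h1 h2 => by omega)
      rw [rng_self] at IH
      rw [IH]
      rcases Nat.eq_or_lt_of_le h0 with heq | hlt
      · subst heq
        have e1 : (if rng i0 i0 ≠ [] then sets ++ [rng i0 i0] else sets) = sets := by
          simp [rng_self]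
        rw [e1, altLoop_neg states value i0 hi hv]
      · have hre : runEnd states value i0 = i :=
          runEnd_eq states value i0 i h0 (by omega)
            (fun k hk h1 h2 => hrun k hk h1 h2) (Or.inr ⟨hi, hv⟩)
        have e1 : (if rng i0 i ≠ [] then sets ++ [rng i0 i] else sets) = sets ++ [rng i0 i] := by
          simp [rng_ne_nil i0 i hlt]
        rw [e1,
          altLoop_pos states value i0 (by omega) (hrun i0 (by omega) (Nat.le_refl _) hlt), hre,
          altLoop_neg states value i hi hv]
        simp
  · -- i = length: the loop is over, apply the trailing flush
    have hieq : i = states.length := by omega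
    subst hieq
    rw [List.drop_length, aLoop]
    rcases Nat.eq_or_lt_of_le h0 with heq | hlt
    · subst heq
      rw [rng_self]
      simp [altLoop_end states value states.length hi]
    · rw [if_pos (rng_ne_nil i0 states.length hlt)]
      have hre : runEnd states value i0 = states.length :=
        runEnd_eq states value i0 states.length (by omega) (Nat.le_refl _)
          (fun k hk h1 h2 => hrun k hk h1 (by omega)) (Or.inl rfl)
      rw [altLoop_pos states value i0 (by omega)
          (hrun i0 (by omega) (Nat.le_refl _) (by omega)), hre,
        altLoop_end states value states.length hi]
termination_by i => states.length - i
decreasing_by all_goals omega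

-- ===== VERDICT (by name: the statement is the Claim_ definition above) =====
theorem split_into_sets_spec : Claim_equal_split_into_sets := by
  intro data states value _
  unfold Spec_split_into_sets split_into_sets split_into_sets_alt
  have h := main_lemma states value 0 0 [] (Nat.le_refl _) (Nat.zero_le _)
    (fun k hk h1 h2 => by omega)
  simpa [rng_self] using h
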